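-- pv_equiv track=rewrite | github.com/tayyrov/AdventOfCode | codes/day3_task2.py | frequency_calculator
-- ===== SOURCE A (Python) =====
-- def frequency_calculator(lines, index, type):
--     ones = sum(1 for line in lines if line[index] == "1")
--     zeros = sum(1 for line in lines if line[index] == "0")
--     if type == "oxygen":
--         if ones >= zeros:
--                 return  [line for line in lines if line[index] == "1"]
--         else:
--             return [line for line in lines if line[index] == "0"]
--     else:
--         if ones < zeros:
--                 return  [line for line in lines if line[index] == "1"]
--         else:
--             return  [line for line in lines if line[index] == "0"]
-- ===== SOURCE B (Python) =====
-- def frequency_calculator(lines, index, type):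
--     # Single partition pass: each line goes to ones/zeros (or neither); then pick a prebuilt group.
--     ones = []
--     zeros = []
--     for line in lines:
--         c = line[index]
--         if c == "1":
--             ones.append(line)
--         elif c == "0":
--             zeros.append(line)
--     if type == "oxygen":
--         return ones if len(ones) >= len(zeros) else zeros
--     else:
--         return ones if len(ones) < len(zeros) else zeros
-- ===== Notes on version B (the rewrite author's own statement) =====
-- stated objective: simpler
-- what changed: One partition pass builds the '1' and '0' groups together and the counts come from their lengths, replacing A's four separate scans (two counting passes plus a re-filtering pass per branch).
import Mathlib
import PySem

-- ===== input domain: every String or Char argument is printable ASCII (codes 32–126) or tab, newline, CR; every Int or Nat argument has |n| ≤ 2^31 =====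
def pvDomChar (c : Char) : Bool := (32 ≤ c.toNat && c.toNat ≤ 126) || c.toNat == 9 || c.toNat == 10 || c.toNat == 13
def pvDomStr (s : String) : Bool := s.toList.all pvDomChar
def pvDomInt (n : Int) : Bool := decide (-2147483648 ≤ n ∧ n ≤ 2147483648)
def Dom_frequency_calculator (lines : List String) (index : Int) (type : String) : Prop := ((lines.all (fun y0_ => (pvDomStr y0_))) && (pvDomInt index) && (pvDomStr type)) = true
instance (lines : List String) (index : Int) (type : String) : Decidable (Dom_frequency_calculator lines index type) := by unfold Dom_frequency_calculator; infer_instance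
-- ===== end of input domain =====

-- B replaces A's four separate scans of `lines` with one partition pass and length comparisons: objective 'simpler'.

-- ===== PORT A =====
def frequency_calculator (lines : List String) (index : Int) (type : String) : List String :=
  let ones : Int := (lines.filter (fun line => PySem.Str.pyGet? line index == some '1')).length
  let zeros : Int := (lines.filter (fun line => PySem.Str.pyGet? line index == some '0')).length
  if type == "oxygen" then
    if ones ≥ zeros then lines.filter (fun line => PySem.Str.pyGet? line index == some '1')
    else lines.filter (fun line => PySem.Str.pyGet? line index == some '0')
  else
    if ones < zeros then lines.filter (fun line => PySem.Str.pyGet? line index == some '1')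
    else lines.filter (fun line => PySem.Str.pyGet? line index == some '0')

-- ===== PORT B =====
-- one pass over the lines, building the '1' group and the '0' group together (B's loop with two accumulators)
def pvPartition (index : Int) : List String → List String × List String
  | [] => ([], [])
  | line :: rest =>
    let (o, z) := pvPartition index rest
    match PySem.Str.pyGet? line index with
    | some '1' => (line :: o, z)
    | some '0' => (o, line :: z)
    | _ => (o, z)

def frequency_calculator_alt (lines : List String) (index : Int) (type : String) : List String :=
  let p := pvPartition index lines
  let ones := p.1
  let zeros := p.2
  if type == "oxygen" then
    if ones.length ≥ zeros.length then ones else zeros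
  else
    if ones.length < zeros.length then ones else zeros

-- ===== PRECONDITION & SPEC =====
-- A raises IndexError when some line's length makes line[index] out of range; those inputs are excluded.
def Pre_frequency_calculator (lines : List String) (index : Int) (type : String) : Prop :=
  ∀ line ∈ lines, PySem.Raise.InRange line.length index
instance (lines : List String) (index : Int) (type : String) : Decidable (Pre_frequency_calculator lines index type) := by unfold Pre_frequency_calculator; infer_instance
def pvWitness_frequency_calculator : List String × Int × String := (["10", "01", "11"], 0, "oxygen")
def Spec_frequency_calculator (lines : List String) (index : Int) (type : String) (out : List String) : Prop := out = frequency_calculator_alt lines index type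
instance (lines : List String) (index : Int) (type : String) (out : List String) : Decidable (Spec_frequency_calculator lines index type out) := by unfold Spec_frequency_calculator; infer_instance

-- ===== CLAIM (what is proved, stated in full; the proofs are below) =====
def Claim_equal_frequency_calculator : Prop := ∀ (lines : List String) (index : Int) (type : String), Dom_frequency_calculator lines index type → Pre_frequency_calculator lines index type → Spec_frequency_calculator lines index type (frequency_calculator lines index type)

-- ===== LEMMAS AND PROOFS =====
theorem pvPartition_eq_filters (index : Int) (lines : List String) :
    pvPartition index lines
      = (lines.filter (fun line => PySem.Str.pyGet? line index == some '1'),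
         lines.filter (fun line => PySem.Str.pyGet? line index == some '0')) := by
  induction lines with
  | nil => rfl
  | cons l ls ih =>
    simp only [pvPartition, ih, List.filter_cons]
    rcases h : PySem.Str.pyGet? l index with _ | c
    · simp
    · by_cases h1 : c = '1'
      · subst h1; simp
      · by_cases h0 : c = '0'
        · subst h0; simp
        · simp [h1, h0]

-- ===== VERDICT (by name: the statement is the Claim_ definition above) =====
theorem frequency_calculator_spec : Claim_equal_frequency_calculator := by
  intro lines index type _ _
  unfold Spec_frequency_calculator frequency_calculator frequency_calculator_alt
  rw [pvPartition_eq_filters]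
  simp only []
  split_ifs with h1 h2 h3 h4 h5 h6 <;> first
    | rfl
    | (exfalso; omega)
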